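-- pv_equiv track=rewrite | github.com/Richard-Carnivale/Lab6 | main.py | decode_password
-- ===== SOURCE A (Python) =====
-- def decode_password(password): # This decode function was made by Emir Erkilic that returns the decoded password, and is used when option 2 is selected.
--     decoded = ""
--     for char in str(password):
--         if char.isdigit():
--             digit = int(char)
--             if 3 <= digit <= 9:
--                 decoded_digit = (digit - 3) % 10
--             else:
--                 decoded_digit = (digit + 7) % 10
--             decoded += str(decoded_digit)
--         else:
--             decoded += char
--     return decoded
-- ===== SOURCE B (Python) =====
-- _TABLE = str.maketrans("0123456789", "7890123456")
--
-- def decode_password(password):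
--     return str(password).translate(_TABLE)
-- ===== Notes on version B (the rewrite author's own statement) =====
-- stated objective: idiomatic
-- what changed: Replaced the explicit per-character loop with branching digit arithmetic and string concatenation by a precomputed str.maketrans translation table applied in a single str.translate pass.
import Mathlib
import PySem

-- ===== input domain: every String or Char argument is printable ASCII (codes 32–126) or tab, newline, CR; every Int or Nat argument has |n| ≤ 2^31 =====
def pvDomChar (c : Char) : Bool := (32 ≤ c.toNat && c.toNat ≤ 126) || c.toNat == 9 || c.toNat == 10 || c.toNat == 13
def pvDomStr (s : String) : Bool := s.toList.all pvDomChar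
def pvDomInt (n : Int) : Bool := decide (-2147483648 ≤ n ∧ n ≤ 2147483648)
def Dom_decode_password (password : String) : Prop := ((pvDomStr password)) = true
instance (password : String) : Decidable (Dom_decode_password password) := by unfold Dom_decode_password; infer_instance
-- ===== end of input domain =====

-- B replaces A's explicit branching loop by a precomputed digit-translation table applied
-- in one mapping pass (idiomatic; same cost).


-- ===== PORT A =====
-- literal transliteration: loop over the characters, branch on isdigit, shift via % 10, append
def decode_password (password : String) : String :=
  password.toList.foldl
    (fun decoded c =>
      if PySem.Chars.isdigit c then
        -- int(char); the isdigit guard makes int() succeed, so getD 0 is never the default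
        let digit : Int := (PySem.Int.ofStr? (String.singleton c)).getD 0
        let decoded_digit : Int :=
          if 3 ≤ digit ∧ digit ≤ 9 then PySem.Int.mod (digit - 3) 10
          else PySem.Int.mod (digit + 7) 10
        decoded ++ PySem.Int.toStr decoded_digit
      else
        decoded ++ String.singleton c)
    ""

-- ===== PORT B =====
-- the fixed translation table (str.maketrans("0123456789", "7890123456"))
def pvTable : List (Char × Char) := "0123456789".toList.zip "7890123456".toList

-- str.translate: map each character through the table, unmapped characters unchanged
def decode_password_alt (password : String) : String :=
  String.ofList (password.toList.map (fun c => ((pvTable.lookup c).getD c)))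

-- ===== PRECONDITION & SPEC =====
def Spec_decode_password (password : String) (out : String) : Prop := out = decode_password_alt password
instance (password : String) (out : String) : Decidable (Spec_decode_password password out) := by unfold Spec_decode_password; infer_instance

-- ===== CLAIM (what is proved, stated in full; the proofs are below) =====
def Claim_equal_decode_password : Prop := ∀ (password : String), Dom_decode_password password → Spec_decode_password password (decode_password password)

-- ===== LEMMAS AND PROOFS =====

-- A's per-character step, named for the proofs
def pvStepA (decoded : String) (c : Char) : String :=
  if PySem.Chars.isdigit c then
    let digit : Int := (PySem.Int.ofStr? (String.singleton c)).getD 0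
    let decoded_digit : Int :=
      if 3 ≤ digit ∧ digit ≤ 9 then PySem.Int.mod (digit - 3) 10
      else PySem.Int.mod (digit + 7) 10
    decoded ++ PySem.Int.toStr decoded_digit
  else
    decoded ++ String.singleton c

-- B's per-character map
def pvStepB (c : Char) : Char := (pvTable.lookup c).getD c

theorem pv_char_of_toNat (c : Char) (n : Nat) (h : c.toNat = n)
    (hd : (Char.ofNat n).toNat = n) : c = Char.ofNat n := by
  apply Char.ext
  exact UInt32.toNat_inj.mp (h.trans hd.symm)

theorem pv_digits (c : Char) (h : PySem.Chars.isdigit c = true) :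
    c = '0' ∨ c = '1' ∨ c = '2' ∨ c = '3' ∨ c = '4' ∨ c = '5' ∨ c = '6' ∨ c = '7' ∨ c = '8' ∨ c = '9' := by
  simp [PySem.Chars.isdigit] at h
  obtain ⟨h1, h2⟩ := h
  have h1' : 48 ≤ c.toNat := h1
  have h2' : c.toNat ≤ 57 := h2
  interval_cases hn : c.toNat <;> simp_all [pv_char_of_toNat c _ hn (by decide)]

theorem pv_lookup_nondigit (c : Char) (h : PySem.Chars.isdigit c = false) :
    pvTable.lookup c = none := by
  have ne : ∀ d : Char, PySem.Chars.isdigit d = true → c ≠ d := by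
    intro d hd e; rw [e] at h; rw [hd] at h; exact Bool.noConfusion h
  simp [pvTable, List.lookup,
    beq_eq_false_iff_ne.mpr (ne '0' (by decide)), beq_eq_false_iff_ne.mpr (ne '1' (by decide)),
    beq_eq_false_iff_ne.mpr (ne '2' (by decide)), beq_eq_false_iff_ne.mpr (ne '3' (by decide)),
    beq_eq_false_iff_ne.mpr (ne '4' (by decide)), beq_eq_false_iff_ne.mpr (ne '5' (by decide)),
    beq_eq_false_iff_ne.mpr (ne '6' (by decide)), beq_eq_false_iff_ne.mpr (ne '7' (by decide)),
    beq_eq_false_iff_ne.mpr (ne '8' (by decide)), beq_eq_false_iff_ne.mpr (ne '9' (by decide))]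

theorem pv_step_eq (s : String) (c : Char) :
    (pvStepA s c).toList = s.toList ++ [pvStepB c] := by
  by_cases h : PySem.Chars.isdigit c = true
  · rcases pv_digits c h with h' | h' | h' | h' | h' | h' | h' | h' | h' | h' <;> subst h'
    · rw [show pvStepA s '0' = s ++ "7" from rfl]; simp; decide
    · rw [show pvStepA s '1' = s ++ "8" from rfl]; simp; decide
    · rw [show pvStepA s '2' = s ++ "9" from rfl]; simp; decide
    · rw [show pvStepA s '3' = s ++ "0" from rfl]; simp; decide
    · rw [show pvStepA s '4' = s ++ "1" from rfl]; simp; decide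
    · rw [show pvStepA s '5' = s ++ "2" from rfl]; simp; decide
    · rw [show pvStepA s '6' = s ++ "3" from rfl]; simp; decide
    · rw [show pvStepA s '7' = s ++ "4" from rfl]; simp; decide
    · rw [show pvStepA s '8' = s ++ "5" from rfl]; simp; decide
    · rw [show pvStepA s '9' = s ++ "6" from rfl]; simp; decide
  · have h' : PySem.Chars.isdigit c = false := by
      cases hb : PySem.Chars.isdigit c
      · rfl
      · exact absurd hb h
    simp [pvStepA, pvStepB, h', pv_lookup_nondigit c h']

theorem pv_fold_eq (l : List Char) (acc : String) :
    (l.foldl pvStepA acc).toList = acc.toList ++ l.map pvStepB := by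
  induction l generalizing acc with
  | nil => simp
  | cons c cs ih =>
    simp only [List.foldl_cons, List.map_cons, ih, pv_step_eq]
    simp

-- ===== VERDICT (by name: the statement is the Claim_ definition above) =====
theorem decode_password_spec : Claim_equal_decode_password := by
  intro password _
  show decode_password password = decode_password_alt password
  have hA : decode_password password = password.toList.foldl pvStepA "" := rfl
  have h := pv_fold_eq password.toList ""
  rw [hA] at *
  apply String.toList_inj.mp
  rw [h]
  simp [decode_password_alt, pvStepB, String.toList_ofList]
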